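-- pv_equiv track=rewrite | github.com/pranavpatil004/DS-and-Algo | array_burst.py | solve
-- ===== SOURCE A (Python) =====
-- def solve(A, burst_len):
--     stack = [A[0]]
--     temp = []
--     i = 1
--     while i < len(A):
--         if stack and A[i] == stack[-1]:
--             ele = stack[-1]
--             temp = []
--             while stack and stack[-1] == ele:
--                 temp.append(stack.pop())
--             while i < len(A) and A[i] == ele:
--                 temp.append(A[i])
--                 i += 1
--             if len(temp) < burst_len:
--                 stack.extend(temp)
--         else:
--             stack.append(A[i])
--             i += 1
--     return stack
-- ===== SOURCE B (Python) =====
-- def solve(A, burst_len):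
--     # stack of [value, count] groups; a group is burst-tested only when its run
--     # in the input ends (next differing element, or end of input)
--     groups = []
--     for x in A:
--         if groups and groups[-1][0] == x:
--             groups[-1][1] += 1
--         else:
--             if groups and groups[-1][1] >= 2 and groups[-1][1] >= burst_len:
--                 groups.pop()
--             if groups and groups[-1][0] == x:
--                 groups[-1][1] += 1
--             else:
--                 groups.append([x, 1])
--     if groups and groups[-1][1] >= 2 and groups[-1][1] >= burst_len:
--         groups.pop()
--     return [v for v, c in groups for _ in range(c)]
-- ===== Notes on version B (the rewrite author's own statement) =====
-- stated objective: simpler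
-- what changed: Replaces A's element-wise stack with nested pop/consume while-loops by a single pass over A maintaining a stack of (value,count) groups with a lazy burst test at each run end, then flattening the groups.
-- crash fix: On empty A, A raises IndexError from A[0]; B returns []. — e.g. on solve([], 2): A raises IndexError, B returns []
import Mathlib
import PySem

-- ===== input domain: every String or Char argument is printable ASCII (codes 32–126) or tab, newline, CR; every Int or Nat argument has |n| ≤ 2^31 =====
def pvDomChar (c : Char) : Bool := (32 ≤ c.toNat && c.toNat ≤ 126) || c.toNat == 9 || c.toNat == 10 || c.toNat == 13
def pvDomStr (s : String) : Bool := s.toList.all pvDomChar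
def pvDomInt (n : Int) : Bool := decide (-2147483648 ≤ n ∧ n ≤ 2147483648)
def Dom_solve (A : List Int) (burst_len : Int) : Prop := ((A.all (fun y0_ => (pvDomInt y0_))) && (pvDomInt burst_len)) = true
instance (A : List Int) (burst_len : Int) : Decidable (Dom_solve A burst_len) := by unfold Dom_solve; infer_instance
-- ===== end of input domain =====

-- B replaces A's element-wise stack (with inner while loops popping/consuming whole runs)
-- by a one-pass stack of (value,count) groups with a lazy burst test at each run end;
-- same return value, simpler code.

-- ===== PORT A =====
-- Both inner 'while' loops of A split a leading run of elements equal to `ele` off a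
-- list; spanEq is that splitting (first component = the elements taken in order, second
-- = the rest).
def spanEq (ele : Int) : List Int → List Int × List Int
  | [] => ([], [])
  | y :: ys => if y = ele then
      let p := spanEq ele ys
      (y :: p.1, p.2)
    else ([], y :: ys)

theorem spanEq_snd_length_le (ele : Int) (l : List Int) : (spanEq ele l).2.length ≤ l.length := by
  induction l with
  | nil => simp [spanEq]
  | cons y ys ih =>
    simp only [spanEq]
    split
    · simpa using le_trans ih (Nat.le_succ _)
    · simp

-- A's outer while loop.  The Lean stack keeps Python's stack[-1] (the top) at the HEAD,
-- so Python's append is cons and the final stack is returned reversed by `solve`.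
-- `temp` collects the popped run then the consumed input run, exactly as in A; since
-- every element of temp equals `ele`, Python's stack.extend(temp) is `temp ++ stack` here.
def solveLoopA (burst_len : Int) (stack : List Int) : List Int → List Int
  | [] => stack
  | x :: rest =>
    match stack with
    | top :: s =>
      if hx : x = top then
        let p1 := spanEq top (top :: s)          -- while stack and stack[-1]==ele: temp.append(stack.pop())
        let p2 := spanEq top (x :: rest)         -- while i<len(A) and A[i]==ele: temp.append(A[i]); i+=1
        let temp := p1.1 ++ p2.1
        let stack' := if (temp.length : Int) < burst_len then temp ++ p1.2 else p1.2
        solveLoopA burst_len stack' p2.2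
      else solveLoopA burst_len (x :: top :: s) rest
    | [] => solveLoopA burst_len [x] rest
  termination_by l => l.length
  decreasing_by
    · simp only [spanEq, if_pos hx]
      exact Nat.lt_succ_of_le (spanEq_snd_length_le top rest)
    · simp
    · simp

-- stack = [A[0]]; on empty A the Python raises IndexError (excluded by Pre_solve).
def solve (A : List Int) (burst_len : Int) : List Int :=
  match A with
  | [] => []
  | a :: rest => (solveLoopA burst_len [a] rest).reverse

-- ===== PORT B =====
-- groups keep Python's groups[-1] (the top) at the HEAD; counts are Source B's positive ints.
-- 'if groups and groups[-1][1] >= 2 and groups[-1][1] >= burst_len: groups.pop()'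
def burstTopB (burst_len : Int) : List (Int × Nat) → List (Int × Nat)
  | [] => []
  | (v, c) :: rest => if 2 ≤ c ∧ burst_len ≤ (c : Int) then rest else (v, c) :: rest

-- the body of Source B's for loop
def stepB (burst_len : Int) (groups : List (Int × Nat)) (x : Int) : List (Int × Nat) :=
  match groups with
  | (v, c) :: rest =>
    if v = x then (v, c + 1) :: rest
    else
      match burstTopB burst_len ((v, c) :: rest) with
      | (w, d) :: r => if w = x then (w, d + 1) :: r else (x, 1) :: (w, d) :: r
      | [] => [(x, 1)]
  | [] => [(x, 1)]

-- [v for v, c in groups for _ in range(c)]; groups are stored top-first, hence the reverse.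
def solve_alt (A : List Int) (burst_len : Int) : List Int :=
  ((burstTopB burst_len (A.foldl (stepB burst_len) [])).flatMap
      (fun p => List.replicate p.2 p.1)).reverse

-- ===== PRECONDITION & SPEC =====
-- Pre_ excludes only the empty list, on which A's `A[0]` raises IndexError.
def Pre_solve (A : List Int) (burst_len : Int) : Prop := A ≠ []
instance (A : List Int) (burst_len : Int) : Decidable (Pre_solve A burst_len) := by
  unfold Pre_solve; infer_instance
def pvWitness_solve : List Int × Int := ([1, 1, 2], 2)

-- On empty A the Python A raises IndexError (A[0]); B returns [].
def Raises_solve (A : List Int) (burst_len : Int) : Prop := A = []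
instance (A : List Int) (burst_len : Int) : Decidable (Raises_solve A burst_len) := by
  unfold Raises_solve; infer_instance
def pvRaiseWitness_solve : List Int × Int := ([], 2)
def pvRaiseWitnessOut_solve : List Int := []

def Spec_solve (A : List Int) (burst_len : Int) (out : List Int) : Prop := out = solve_alt A burst_len
instance (A : List Int) (burst_len : Int) (out : List Int) : Decidable (Spec_solve A burst_len out) := by unfold Spec_solve; infer_instance

-- ===== CLAIM (what is proved, stated in full; the proofs are below) =====
def Claim_equal_solve : Prop := ∀ (A : List Int) (burst_len : Int), Dom_solve A burst_len → Pre_solve A burst_len → Spec_solve A burst_len (solve A burst_len)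
def Claim_raises_solve : Prop := (∀ (A : List Int) (burst_len : Int), Dom_solve A burst_len → Raises_solve A burst_len → ¬ Pre_solve A burst_len) ∧ (Dom_solve (pvRaiseWitness_solve.1) (pvRaiseWitness_solve.2) ∧ Raises_solve (pvRaiseWitness_solve.1) (pvRaiseWitness_solve.2) ∧ solve_alt (pvRaiseWitness_solve.1) (pvRaiseWitness_solve.2) = pvRaiseWitnessOut_solve)

-- ===== LEMMAS AND PROOFS =====

-- flatten a group stack (top-first) to A's element stack (top-first)
def Fl (gs : List (Int × Nat)) : List Int := gs.flatMap (fun p => List.replicate p.2 p.1)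

-- invariant of B's group stack: positive counts, adjacent groups have distinct values
def GoodG (G : List (Int × Nat)) : Prop :=
  (∀ p ∈ G, 1 ≤ p.2) ∧ List.IsChain (fun p q : Int × Nat => p.1 ≠ q.1) G

theorem Fl_cons (v : Int) (c : Nat) (r : List (Int × Nat)) :
    Fl ((v, c) :: r) = List.replicate c v ++ Fl r := by simp [Fl]

theorem spanEq_fst_all (e : Int) (l : List Int) : ∀ y ∈ (spanEq e l).1, y = e := by
  induction l with
  | nil => simp [spanEq]
  | cons y ys ih =>
    simp only [spanEq]
    split
    · rename_i h
      intro z hz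
      rcases List.mem_cons.mp hz with h1 | h2
      · omega
      · exact ih z h2
    · simp

theorem spanEq_fst_replicate (e : Int) (l : List Int) :
    (spanEq e l).1 = List.replicate (spanEq e l).1.length e :=
  List.eq_replicate_of_mem (spanEq_fst_all e l)

theorem spanEq_snd_head (e : Int) (l : List Int) : ∀ y ∈ (spanEq e l).2.head?, y ≠ e := by
  induction l with
  | nil => simp [spanEq]
  | cons y ys ih =>
    simp only [spanEq]
    split
    · exact ih
    · rename_i h; simpa using h

theorem spanEq_append (e : Int) (l : List Int) : (spanEq e l).1 ++ (spanEq e l).2 = l := by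
  induction l with
  | nil => rfl
  | cons y ys ih =>
    simp only [spanEq]
    split
    · rw [List.cons_append, ih]
    · rfl

theorem spanEq_replicate_append (e : Int) (d : Nat) (t : List Int)
    (ht : ∀ y ∈ t.head?, y ≠ e) : spanEq e (List.replicate d e ++ t) = (List.replicate d e, t) := by
  induction d with
  | zero =>
    simp only [List.replicate_zero, List.nil_append]
    cases t with
    | nil => rfl
    | cons a s => simp only [spanEq]; rw [if_neg (by simpa using ht a)]
  | succ n ih => simp [List.replicate_succ, spanEq, ih]

theorem spanEq_cons_self (e : Int) (l : List Int) :
    spanEq e (e :: l) = (e :: (spanEq e l).1, (spanEq e l).2) := by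
  simp [spanEq]

-- B's fold over a run of elements equal to x just increments the top count
theorem foldl_run (bl x : Int) (run : List Int) (h : ∀ y ∈ run, y = x) :
    ∀ (m : Nat) (t : List (Int × Nat)),
      run.foldl (stepB bl) ((x, m) :: t) = (x, m + run.length) :: t := by
  induction run with
  | nil => intro m t; simp
  | cons y ys ih =>
    intro m t
    have hy : y = x := h y (by simp)
    subst hy
    have hstep1 : stepB bl ((y, m) :: t) y = (y, m + 1) :: t := by simp [stepB]
    rw [List.foldl_cons, hstep1, ih (fun z hz => h z (by simp [hz]))]
    simp [Nat.add_assoc, Nat.add_comm 1 ys.length]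

-- B's fold splits at the end of the leading run
theorem foldl_split (bl x : Int) (rest : List Int) (m : Nat) (t : List (Int × Nat)) :
    rest.foldl (stepB bl) ((x, m) :: t) =
      (spanEq x rest).2.foldl (stepB bl) ((x, m + (spanEq x rest).1.length) :: t) := by
  conv_lhs => rw [← spanEq_append x rest]
  rw [List.foldl_append, foldl_run bl x _ (spanEq_fst_all x rest)]

theorem GoodG_nil : GoodG [] := ⟨by simp, List.isChain_nil⟩

theorem GoodG_cons {t : List (Int × Nat)} {x : Int} {c : Nat} (hGt : GoodG t)
    (ht : ∀ p ∈ t.head?, p.1 ≠ x) (hc : 1 ≤ c) : GoodG ((x, c) :: t) := by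
  refine ⟨?_, ?_⟩
  · intro p hp
    rcases List.mem_cons.mp hp with h | h
    · subst h; exact hc
    · exact hGt.1 p h
  · exact List.isChain_cons.mpr ⟨fun q hq => (ht q hq).symm, hGt.2⟩

theorem GoodG_tail {p : Int × Nat} {r : List (Int × Nat)} (h : GoodG (p :: r)) : GoodG r :=
  ⟨fun q hq => h.1 q (List.mem_cons_of_mem _ hq), (List.isChain_cons.mp h.2).2⟩

theorem GoodG_head_ne {v : Int} {c : Nat} {r : List (Int × Nat)} (h : GoodG ((v, c) :: r)) :
    ∀ p ∈ r.head?, p.1 ≠ v := by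
  intro p hp
  exact fun hpv => (List.isChain_cons.mp h.2).1 p hp (by simp [hpv])

theorem GoodG_bt (bl : Int) {G : List (Int × Nat)} (h : GoodG G) : GoodG (burstTopB bl G) := by
  cases G with
  | nil => exact h
  | cons p r =>
    obtain ⟨v, c⟩ := p
    simp only [burstTopB]
    split
    · exact GoodG_tail h
    · exact h

-- head of the flattened stack is the top group's value
theorem Fl_head_ne {t : List (Int × Nat)} {x : Int} (hGt : GoodG t)
    (ht : ∀ p ∈ t.head?, p.1 ≠ x) : ∀ y ∈ (Fl t).head?, y ≠ x := by
  cases t with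
  | nil => simp [Fl]
  | cons p r =>
    obtain ⟨v, c⟩ := p
    have hc : 1 ≤ c := hGt.1 (v, c) (by simp)
    obtain ⟨c', rfl⟩ : ∃ c', c = c' + 1 := ⟨c - 1, by omega⟩
    intro y hy
    rw [Fl_cons, List.replicate_succ] at hy
    simp only [List.cons_append, List.head?_cons, Option.mem_def, Option.some.injEq] at hy
    subst hy
    exact ht (v, c' + 1) (by simp)

-- equation lemmas for solveLoopA
theorem loopA_nil (bl : Int) (S : List Int) : solveLoopA bl S [] = S := by
  cases S <;> simp [solveLoopA]

theorem loopA_push (bl x : Int) (rest S : List Int) (h : ∀ y ∈ S.head?, y ≠ x) :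
    solveLoopA bl S (x :: rest) = solveLoopA bl (x :: S) rest := by
  cases S with
  | nil => simp [solveLoopA]
  | cons top s =>
    have hne : ¬ x = top := fun hxe => h top (by simp) (by omega)
    simp [solveLoopA, hne]

-- A's merge branch, from a run-boundary state: pops the whole top group, consumes the
-- input run, and applies exactly B's burst test to the combined count.
theorem loopA_merge (bl x : Int) (rest2 : List Int) (m : Nat) (t : List (Int × Nat))
    (hGt : GoodG t) (ht : ∀ p ∈ t.head?, p.1 ≠ x) :
    solveLoopA bl (Fl ((x, m + 1) :: t)) (x :: rest2) =
      solveLoopA bl (Fl (burstTopB bl ((x, (m + 1) + (1 + (spanEq x rest2).1.length)) :: t)))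
        (spanEq x rest2).2 := by
  have hflt : ∀ y ∈ (Fl t).head?, y ≠ x := Fl_head_ne hGt ht
  have hp1 : spanEq x (List.replicate (m + 1) x ++ Fl t) = (List.replicate (m + 1) x, Fl t) :=
    spanEq_replicate_append x (m + 1) (Fl t) hflt
  have hS : Fl ((x, m + 1) :: t) = x :: (List.replicate m x ++ Fl t) := by
    rw [Fl_cons, List.replicate_succ]; simp
  rw [hS]
  rw [solveLoopA]
  rw [dif_pos rfl]
  have hback : x :: (List.replicate m x ++ Fl t) = List.replicate (m + 1) x ++ Fl t := by
    rw [List.replicate_succ]; simp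
  rw [hback, hp1, spanEq_cons_self]
  set k := (spanEq x rest2).1.length with hk
  have hrun : (spanEq x rest2).1 = List.replicate k x := by
    rw [hk]; exact spanEq_fst_replicate x rest2
  have htotal : List.replicate (m + 1) x ++ x :: (spanEq x rest2).1 =
      List.replicate ((m + 1) + (1 + k)) x := by
    rw [hrun, show (1 + k) = k + 1 by omega, List.replicate_add (m + 1) (k + 1) x]
    simp [List.replicate_succ]
  simp only [htotal, List.length_replicate]
  have hge2 : 2 ≤ (m + 1) + (1 + k) := by omega
  by_cases hb : ((((m + 1) + (1 + k) : Nat) : Int) < bl)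
  · rw [if_pos hb]
    rw [burstTopB, if_neg (by push_cast at hb ⊢; omega)]
    rw [Fl_cons]
  · rw [if_neg hb]
    rw [burstTopB, if_pos ⟨hge2, by push_cast at hb ⊢; omega⟩]

-- the main bisimulation: at a run boundary A's eagerly-tested stack Fl (burstTopB G),
-- run through A's loop, equals flattening + final burst test of B's fold
theorem main_lemma (bl : Int) : ∀ (n : Nat) (L : List Int) (G : List (Int × Nat)),
    L.length ≤ n → GoodG G → (∀ x ∈ L.head?, ∀ p ∈ G.head?, p.1 ≠ x) →
    solveLoopA bl (Fl (burstTopB bl G)) L = Fl (burstTopB bl (L.foldl (stepB bl) G)) := by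
  intro n
  induction n with
  | zero =>
    intro L G hL _ _
    have hnil : L = [] := List.length_eq_zero_iff.mp (Nat.le_zero.mp hL)
    subst hnil
    simp [loopA_nil]
  | succ n ih =>
    intro L G hL hG hhead
    cases L with
    | nil => simp [loopA_nil]
    | cons x rest =>
      have hGg : GoodG (burstTopB bl G) := GoodG_bt bl hG
      -- stepB on a state whose top value differs from x runs the burst test first
      have hstep : stepB bl G x =
          (match burstTopB bl G with
           | (w, d) :: r => if w = x then (w, d + 1) :: r else (x, 1) :: (w, d) :: r
           | [] => [(x, 1)]) := by
        cases G with
        | nil => rfl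
        | cons p r0 =>
          obtain ⟨v, c⟩ := p
          have hvx : v ≠ x := hhead x (by simp) (v, c) (by simp)
          simp [stepB, hvx]
      rw [List.foldl_cons]
      have hrest : rest.length ≤ n := by simpa using hL
      -- continuation after A pushed x on a boundary stack Fl t (t = tested groups)
      have key : ∀ t : List (Int × Nat), GoodG t → (∀ p ∈ t.head?, p.1 ≠ x) →
          solveLoopA bl (x :: Fl t) rest =
            Fl (burstTopB bl (rest.foldl (stepB bl) ((x, 1) :: t))) := by
        intro t hGt ht
        have hG1 : GoodG ((x, 1) :: t) := GoodG_cons hGt ht (by omega)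
        have hxFl : x :: Fl t = Fl (burstTopB bl ((x, 1) :: t)) := by
          rw [burstTopB, if_neg (by omega), Fl_cons]
          simp [List.replicate_succ]
        cases hr2 : rest with
        | nil =>
          subst hr2
          rw [hxFl, loopA_nil]
          simp
        | cons y rest2 =>
          subst hr2
          by_cases hyx : y = x
          · rw [hyx]
            have hxFl1 : x :: Fl t = Fl ((x, 0 + 1) :: t) := by rw [Fl_cons]; simp
            rw [hxFl1, loopA_merge bl x rest2 0 t hGt ht]
            rw [List.foldl_cons, show stepB bl ((x, 1) :: t) x = (x, 2) :: t by simp [stepB]]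
            rw [foldl_split bl x rest2 2 t]
            rw [show 0 + 1 + (1 + (spanEq x rest2).1.length) = 2 + (spanEq x rest2).1.length
              by omega]
            have hlen2 : (spanEq x rest2).2.length ≤ n := by
              have h1 := spanEq_snd_length_le x rest2
              have h2 : (y :: rest2).length ≤ n := hrest
              simp at h2
              omega
            exact ih (spanEq x rest2).2 _ hlen2
              (GoodG_cons hGt ht (by omega))
              (by intro z hz p hp
                  simp only [List.head?_cons, Option.mem_def, Option.some.injEq] at hp
                  subst hp
                  exact fun h => spanEq_snd_head x rest2 z hz (by simpa using h.symm))
          · rw [hxFl]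
            exact ih (y :: rest2) _ hrest hG1
              (by intro z hz p hp
                  simp only [List.head?_cons, Option.mem_def, Option.some.injEq] at hz hp
                  subst hz; subst hp
                  simpa using fun h => hyx h.symm)
      cases hbg : burstTopB bl G with
      | nil =>
        simp only [hbg] at hstep
        rw [hstep]
        have h1 : solveLoopA bl (Fl ([] : List (Int × Nat))) (x :: rest) =
            solveLoopA bl (x :: Fl ([] : List (Int × Nat))) rest := by
          simp [Fl, solveLoopA]
        rw [h1]
        exact key [] GoodG_nil (by simp)
      | cons p r =>
        obtain ⟨w, d⟩ := p
        rw [hbg] at hGg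
        simp only [hbg] at hstep
        have hd : 1 ≤ d := hGg.1 (w, d) (by simp)
        by_cases hwx : w = x
        · -- exposed top matches x: A merges the whole group plus the input run
          subst hwx
          rw [hstep, if_pos rfl]
          obtain ⟨m, rfl⟩ : ∃ m, d = m + 1 := ⟨d - 1, by omega⟩
          have hr_ne : ∀ p ∈ r.head?, p.1 ≠ w := GoodG_head_ne hGg
          rw [loopA_merge bl w rest m r (GoodG_tail hGg) hr_ne]
          rw [foldl_split bl w rest (m + 1 + 1) r]
          rw [show (m + 1) + (1 + (spanEq w rest).1.length) =
              m + 1 + 1 + (spanEq w rest).1.length by omega]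
          have hlen2 : (spanEq w rest).2.length ≤ n :=
            le_trans (spanEq_snd_length_le w rest) hrest
          exact ih (spanEq w rest).2 _ hlen2
            (GoodG_cons (GoodG_tail hGg) hr_ne (by omega))
            (by intro z hz p hp
                simp only [List.head?_cons, Option.mem_def, Option.some.injEq] at hp
                subst hp
                exact fun h => spanEq_snd_head w rest z hz (by simpa using h.symm))
        · -- exposed top differs: A pushes x
          rw [hstep, if_neg hwx]
          rw [loopA_push bl x rest _
            (Fl_head_ne hGg (by
              intro p hp
              simp only [List.head?_cons, Option.mem_def, Option.some.injEq] at hp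
              subst hp
              simpa using hwx))]
          exact key ((w, d) :: r) hGg (by
            intro p hp
            simp only [List.head?_cons, Option.mem_def, Option.some.injEq] at hp
            subst hp
            simpa using hwx)

-- ===== VERDICT (by name: the statement is the Claim_ definition above) =====
theorem solve_spec : Claim_equal_solve := by
  intro A bl _ hpre
  unfold Spec_solve
  cases A with
  | nil => exact absurd rfl hpre
  | cons a rest =>
    have hstart : solveLoopA bl (Fl (burstTopB bl [])) (a :: rest) =
        solveLoopA bl [a] rest := by
      simp [Fl, burstTopB, solveLoopA]
    have h := main_lemma bl (a :: rest).length (a :: rest) [] le_rfl GoodG_nil (by simp)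
    rw [hstart] at h
    show (solveLoopA bl [a] rest).reverse = solve_alt (a :: rest) bl
    rw [h]
    rfl

@[simp] theorem solve_raises : Claim_raises_solve := by
  unfold Claim_raises_solve
  exact ⟨fun A bl _ h => by simp [Pre_solve, Raises_solve] at *; exact h, by decide⟩
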